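-- pv_equiv track=rewrite | github.com/glue04/eecs677_p3 | path_instructions.py | _locate_sink_label
-- ===== SOURCE A (Python) =====
-- def _locate_sink_label(lines):
--     snk_line = -1
--     for i in range(0, len(lines)):
--         if "@SINK" in lines[i] and "declare" not in lines[i]:
--             snk_line = i
--
--     for i in reversed(range(0, snk_line + 1)):
--         for j in lines[i]:
--             if ":" in j:
--                 label = lines[i][0]
--                 return i, label[:len(lines[i][0]) - 1]
--     else:
--         return -1, ""
-- ===== SOURCE B (Python) =====
-- def _locate_sink_label(lines):
--     # One forward pass: track the latest line containing a ':' token, and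
--     # snapshot it whenever an @SINK (non-declare) line is seen.
--     last_colon = -1
--     result = -1
--     for i, line in enumerate(lines):
--         if any(":" in tok for tok in line):
--             last_colon = i
--         if "@SINK" in line and "declare" not in line:
--             result = last_colon
--     if result == -1:
--         return -1, ""
--     return result, lines[result][0][:-1]
-- ===== Notes on version B (the rewrite author's own statement) =====
-- stated objective: alternative
-- what changed: A's two phases (a forward pass to find the last non-declare @SINK line, then a backward scan from it for the nearest line with a ':' token) are collapsed into one forward pass that tracks the latest ':'-line index and snapshots it whenever an @SINK line is seen.
import Mathlib
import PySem

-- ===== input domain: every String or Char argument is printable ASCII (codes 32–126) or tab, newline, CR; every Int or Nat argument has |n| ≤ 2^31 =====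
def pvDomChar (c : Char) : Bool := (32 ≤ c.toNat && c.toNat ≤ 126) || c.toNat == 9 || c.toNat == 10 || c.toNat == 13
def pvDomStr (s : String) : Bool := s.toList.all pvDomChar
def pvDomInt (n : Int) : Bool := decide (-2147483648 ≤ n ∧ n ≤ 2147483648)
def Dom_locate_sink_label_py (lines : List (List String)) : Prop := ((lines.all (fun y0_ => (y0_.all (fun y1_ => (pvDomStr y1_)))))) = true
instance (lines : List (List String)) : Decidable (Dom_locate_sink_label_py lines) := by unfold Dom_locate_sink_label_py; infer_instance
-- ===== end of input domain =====

-- B replaces A's forward find-last-@SINK pass plus backward colon scan with a single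
-- stateful forward pass (objective: alternative one-pass decomposition, same cost).

-- ===== PORT A =====
-- '"@SINK" in lines[i] and "declare" not in lines[i]' (list membership); both Pythons contain this test verbatim
def pvSinkLine (line : List String) : Bool :=
  line.contains "@SINK" && !(line.contains "declare")

-- 'any(":" in j for j in line)'; A's inner 'for j: if ":" in j: return …' returns a value
-- independent of which j triggered, so it is exactly this test; B's Python has it verbatim
def pvColon (line : List String) : Bool := line.any (fun j => PySem.Str.isIn ":" j)

-- A's backward scan 'for i in reversed(range(0, snk_line + 1)): …' with the early return
def pvGoA (lines : List (List String)) : List Int → Int × String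
  | [] => (-1, "")
  | i :: rest =>
    if pvColon (PySem.List.pyGetD lines i []) then
      (i, PySem.Str.slice (PySem.List.pyGetD (PySem.List.pyGetD lines i []) 0 "") none
            (some (PySem.Str.len (PySem.List.pyGetD (PySem.List.pyGetD lines i []) 0 "") - 1)))
    else pvGoA lines rest

def locate_sink_label_py (lines : List (List String)) : Int × String :=
  let snk_line : Int :=
    (PySem.List.pyRange 0 (PySem.List.len lines) 1).foldl
      (fun acc i => if pvSinkLine (PySem.List.pyGetD lines i []) then i else acc) (-1)
  -- reversed(range(0, snk_line + 1)) = range(snk_line, -1, -1)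
  pvGoA lines (PySem.List.pyRange snk_line (-1) (-1))

-- ===== PORT B =====
def pvStepB (st : Int × Int) (p : Int × List String) : Int × Int :=
  let lastColon := if pvColon p.2 then p.1 else st.1
  let result := if pvSinkLine p.2 then lastColon else st.2
  (lastColon, result)

def locate_sink_label_py_alt (lines : List (List String)) : Int × String :=
  let st := (PySem.List.enumerate lines 0).foldl pvStepB (-1, -1)
  if st.2 = -1 then (-1, "")
  else
    (st.2, PySem.Str.slice (PySem.List.pyGetD (PySem.List.pyGetD lines st.2 []) 0 "") none
             (some (-1)))

-- ===== PRECONDITION & SPEC =====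
def Spec_locate_sink_label_py (lines : List (List String)) (out : Int × String) : Prop := out = locate_sink_label_py_alt lines
instance (lines : List (List String)) (out : Int × String) : Decidable (Spec_locate_sink_label_py lines out) := by unfold Spec_locate_sink_label_py; infer_instance

-- ===== CLAIM (what is proved, stated in full; the proofs are below) =====
def Claim_equal_locate_sink_label_py : Prop := ∀ (lines : List (List String)), Dom_locate_sink_label_py lines → Spec_locate_sink_label_py lines (locate_sink_label_py lines)

-- ===== LEMMAS AND PROOFS =====

-- last index ≤ s whose line passes pvColon, or -1
def pvCLe (lines : List (List String)) (s : Int) : Int :=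
  if s < 0 then -1
  else if pvColon (PySem.List.pyGetD lines s []) then s
  else pvCLe lines (s - 1)
termination_by (s + 1).toNat
decreasing_by omega

-- last index whose line passes pvSinkLine, or -1
def pvS (lines : List (List String)) : Int :=
  (PySem.List.enumerate lines 0).foldl (fun a q => if pvSinkLine q.2 then q.1 else a) (-1)

theorem pvCLe_neg (lines : List (List String)) (s : Int) (h : s < 0) : pvCLe lines s = -1 := by
  unfold pvCLe; simp [h]

theorem pvCLe_step (lines : List (List String)) (s : Int) (h : ¬ s < 0) :
    pvCLe lines s =
      (if pvColon (PySem.List.pyGetD lines s []) then s else pvCLe lines (s - 1)) := by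
  rw [pvCLe, if_neg h]

theorem pvCLe_restrict (xs : List (List String)) (x : List String) (s : Int)
    (hs : s < (xs.length : Int)) : pvCLe (xs ++ [x]) s = pvCLe xs s := by
  by_cases h : s < 0
  · rw [pvCLe_neg _ _ h, pvCLe_neg _ _ h]
  · have h' : (0 : Int) ≤ s := by omega
    have hget : PySem.List.pyGetD (xs ++ [x]) s ([] : List String)
        = PySem.List.pyGetD xs s [] := by
      rw [PySem.List.pyGetD_eq_getElem _ _ h' (by rw [List.length_append]; push_cast; omega),
          PySem.List.pyGetD_eq_getElem _ _ h' hs]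
      exact List.getElem_append_left (by omega)
    rw [pvCLe_step _ _ h, pvCLe_step _ _ h, hget]
    split_ifs with hc
    · rfl
    · exact pvCLe_restrict xs x (s - 1) (by omega)
termination_by (s + 1).toNat
decreasing_by omega

theorem pvCLe_bounds (lines : List (List String)) (s : Int) :
    pvCLe lines s = -1 ∨ (0 ≤ pvCLe lines s ∧ pvCLe lines s ≤ s) := by
  by_cases h : s < 0
  · left; exact pvCLe_neg _ _ h
  · rw [pvCLe_step _ _ h]
    split_ifs with hc
    · right; constructor <;> omega
    · rcases pvCLe_bounds lines (s - 1) with h1 | h1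
      · left; exact h1
      · right; omega
termination_by (s + 1).toNat
decreasing_by omega

-- A's backward scan computes pvCLe, with A's slice
theorem pvGoA_eq (lines : List (List String)) (s : Int) :
    pvGoA lines (PySem.List.pyRange s (-1) (-1)) =
      (if pvCLe lines s = -1 then ((-1 : Int), "")
       else
        (pvCLe lines s,
         PySem.Str.slice (PySem.List.pyGetD (PySem.List.pyGetD lines (pvCLe lines s) []) 0 "") none
           (some (PySem.Str.len (PySem.List.pyGetD (PySem.List.pyGetD lines (pvCLe lines s) []) 0 "") - 1)))) := by
  by_cases h : s < 0
  · rw [PySem.List.pyRange_neg_one_eq_nil (by omega), pvCLe_neg _ _ h]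
    simp [pvGoA]
  · rw [PySem.List.pyRange_neg_one_cons (by omega), pvGoA, pvCLe_step _ _ h]
    by_cases hc : pvColon (PySem.List.pyGetD lines s []) = true
    · rw [if_pos hc, if_pos hc, if_neg (show ¬ s = -1 by omega)]
    · rw [if_neg hc, if_neg hc]
      exact pvGoA_eq lines (s - 1)
termination_by (s + 1).toNat
decreasing_by omega

-- both slices drop the last character
theorem pvSlice_eq (label : String) :
    PySem.Str.slice label none (some (PySem.Str.len label - 1)) =
      PySem.Str.slice label none (some (-1)) := by
  have h2 := PySem.Str.slice_to_neg_one label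
  have hlen := PySem.Str.len_eq label
  by_cases h : label.toList.length = 0
  · have : PySem.Str.len label - 1 = -1 := by omega
    rw [this]
  · have hb : (0 : Int) ≤ PySem.Str.len label - 1 := by omega
    have hgen : ∀ (b : Int), 0 ≤ b →
        (PySem.Str.slice label none (some b)).toList = label.toList.take b.toNat := by
      intro b hb'
      rw [PySem.Str.slice]
      simp [PySem.List.slice_to label.toList hb']
    have h1 := hgen _ hb
    have ht : (PySem.Str.len label - 1).toNat = label.toList.length - 1 := by omega
    apply String.toList_injective
    rw [h1, h2, ht, ← List.dropLast_eq_take]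

-- the main single-pass invariant, by snoc induction
theorem pvFold_inv (xs : List (List String)) :
    ((PySem.List.enumerate xs 0).foldl pvStepB (-1, -1)).1 = pvCLe xs ((xs.length : Int) - 1)
    ∧ (pvS xs = -1 ∨ (0 ≤ pvS xs ∧ pvS xs < (xs.length : Int)))
    ∧ ((PySem.List.enumerate xs 0).foldl pvStepB (-1, -1)).2
        = (if pvS xs = -1 then -1 else pvCLe xs (pvS xs)) := by
  induction xs using List.reverseRecOn with
  | nil =>
    refine ⟨?_, Or.inl rfl, ?_⟩ <;> simp [PySem.List.enumerate, pvS, pvCLe]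
  | append_singleton xs x ih =>
    obtain ⟨ih1, ih2, ih3⟩ := ih
    have hlenx : ((xs ++ [x]).length : Int) = (xs.length : Int) + 1 := by
      have : (xs ++ [x]).length = xs.length + 1 := by simp
      rw [this]; push_cast; ring
    have henum : PySem.List.enumerate (xs ++ [x]) 0
        = PySem.List.enumerate xs 0 ++ [((xs.length : Int), x)] := by
      rw [PySem.List.enumerate_append]
      simp [PySem.List.enumerate_cons, PySem.List.enumerate_nil]
    have hSsnoc : pvS (xs ++ [x])
        = (if pvSinkLine x then (xs.length : Int) else pvS xs) := by
      simp only [pvS, henum, List.foldl_append, List.foldl_cons, List.foldl_nil]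
    have hgetx : PySem.List.pyGetD (xs ++ [x]) (xs.length : Int) ([] : List String) = x := by
      rw [PySem.List.pyGetD_eq_getElem _ _ (by omega) (by rw [hlenx]; omega)]
      simp
    have hCtop : pvCLe (xs ++ [x]) (xs.length : Int)
        = (if pvColon x then (xs.length : Int) else pvCLe xs ((xs.length : Int) - 1)) := by
      rw [pvCLe_step _ _ (by omega), hgetx, pvCLe_restrict xs x _ (by omega)]
    have hfold : (PySem.List.enumerate (xs ++ [x]) 0).foldl pvStepB (-1, -1)
        = pvStepB ((PySem.List.enumerate xs 0).foldl pvStepB (-1, -1)) ((xs.length : Int), x) := by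
      simp [henum, List.foldl_append]
    refine ⟨?_, ?_, ?_⟩
    · rw [hfold, hlenx, show (xs.length : Int) + 1 - 1 = (xs.length : Int) by ring, hCtop]
      simp only [pvStepB, ih1]
    · rw [hSsnoc]
      by_cases hsink : pvSinkLine x = true
      · rw [if_pos hsink]
        right; exact ⟨by omega, by rw [hlenx]; omega⟩
      · rw [if_neg hsink]
        rcases ih2 with h | h
        · left; exact h
        · right; exact ⟨h.1, by rw [hlenx]; omega⟩
    · rw [hfold, hSsnoc]
      simp only [pvStepB, ih1, ih3]
      by_cases hsink : pvSinkLine x = true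
      · rw [if_pos hsink, if_pos hsink, if_neg (show ¬ (xs.length : Int) = -1 by omega), hCtop]
      · rw [if_neg hsink, if_neg hsink]
        rcases ih2 with h | h
        · rw [h]; simp
        · rw [if_neg (by omega), if_neg (by omega), pvCLe_restrict xs x _ (by omega)]

-- ===== VERDICT (by name: the statement is the Claim_ definition above) =====
theorem locate_sink_label_py_spec : Claim_equal_locate_sink_label_py := by
  intro lines _
  unfold Spec_locate_sink_label_py
  obtain ⟨_, h2, h3⟩ := pvFold_inv lines
  have hA : locate_sink_label_py lines = pvGoA lines (PySem.List.pyRange (pvS lines) (-1) (-1)) := by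
    unfold locate_sink_label_py pvS
    rw [PySem.List.enumerate_eq_map_pyRange lines ([] : List String), List.foldl_map]
  rcases h2 with hs | hs
  · have hb2 : ((PySem.List.enumerate lines 0).foldl pvStepB (-1, -1)).2 = -1 := by
      rw [h3, hs]; simp
    rw [hA, hs, PySem.List.pyRange_neg_one_eq_nil (by omega)]
    simp only [locate_sink_label_py_alt, hb2, pvGoA]
    simp
  · have h3' : ((PySem.List.enumerate lines 0).foldl pvStepB (-1, -1)).2
        = pvCLe lines (pvS lines) := by
      rw [h3, if_neg (by omega)]
    rw [hA, pvGoA_eq]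
    by_cases hr : pvCLe lines (pvS lines) = -1
    · simp only [locate_sink_label_py_alt, h3', hr, reduceIte]
    · rw [if_neg hr]
      simp only [locate_sink_label_py_alt, h3', if_neg hr]
      rw [pvSlice_eq]
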